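-- pv_equiv track=rewrite | github.com/AeneasVerif/aeneas | scripts/lean_lsp.py | _parse_two_quoted_strings
-- ===== SOURCE A (Python) =====
-- def _parse_quoted_string(s, pos):
--     """Parse a double-quoted string starting at s[pos].
--     Returns (parsed_string, next_pos) or raises ValueError on error.
--     Supports escapes: \\\" \\\\  \\n  \\t"""
--     if pos >= len(s) or s[pos] != '"':
--         raise ValueError(f"Expected '\"' at position {pos}")
--     pos += 1  # skip opening quote
--     chars = []
--     while pos < len(s):
--         ch = s[pos]
--         if ch == '\\' and pos + 1 < len(s):
--             nxt = s[pos + 1]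
--             if nxt == '"':
--                 chars.append('"')
--                 pos += 2
--             elif nxt == '\\':
--                 chars.append('\\')
--                 pos += 2
--             elif nxt == 'n':
--                 chars.append('\n')
--                 pos += 2
--             elif nxt == 't':
--                 chars.append('\t')
--                 pos += 2
--             else:
--                 # Unknown escape — keep as-is
--                 chars.append(ch)
--                 pos += 1
--         elif ch == '"':
--             return ''.join(chars), pos + 1
--         else:
--             chars.append(ch)
--             pos += 1
--     raise ValueError("Unterminated string (missing closing '\"')")
--
-- def _parse_two_quoted_strings(args_str):
--     """Parse 'replace "old" "new"' arguments.
--     Returns (old_str, new_str) or (None, error_message)."""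
--     if not args_str:
--         return None, "Missing arguments"
--     s = args_str
--     # Skip leading whitespace to find first quote
--     pos = 0
--     while pos < len(s) and s[pos] == ' ':
--         pos += 1
--     if pos >= len(s) or s[pos] != '"':
--         return None, "Expected '\"' to start first string"
--     try:
--         old_str, pos = _parse_quoted_string(s, pos)
--     except ValueError as e:
--         return None, f"Error parsing first string: {e}"
--     # Skip whitespace between strings
--     while pos < len(s) and s[pos] == ' ':
--         pos += 1
--     if pos >= len(s) or s[pos] != '"':
--         return None, "Expected '\"' to start second string"
--     try:
--         new_str, pos = _parse_quoted_string(s, pos)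
--     except ValueError as e:
--         return None, f"Error parsing second string: {e}"
--     # Check nothing meaningful remains
--     tail = s[pos:].strip()
--     if tail:
--         return None, f"Unexpected content after second string: {tail[:40]}"
--     return (old_str, new_str), None
-- ===== SOURCE B (Python) =====
-- def _parse_two_quoted_strings(args_str):
--     """Parse 'replace "old" "new"' arguments.
--     Returns (old_str, new_str) or (None, error_message)."""
--     if not args_str:
--         return None, "Missing arguments"
--     # One flat state machine over the string:
--     # 0 = seeking first opening quote, 1 = inside first string,
--     # 2 = seeking second opening quote, 3 = inside second string,
--     # 4 = collecting trailing content.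
--     n = len(args_str)
--     state = 0
--     b0 = ""
--     b1 = ""
--     tail_chars = []
--     i = 0
--     while i < n:
--         c = args_str[i]
--         if state == 0 or state == 2:
--             if c == ' ':
--                 i += 1
--             elif c == '"':
--                 state += 1
--                 i += 1
--             else:
--                 break
--         elif state == 1 or state == 3:
--             if c == '"':
--                 state += 1
--                 i += 1
--             elif c == '\\' and i + 1 < n and args_str[i + 1] in '"\\nt':
--                 nxt = args_str[i + 1]
--                 if nxt == 'n':
--                     dec = '\n'
--                 elif nxt == 't':
--                     dec = '\t'
--                 else:
--                     dec = nxt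
--                 if state == 1:
--                     b0 += dec
--                 else:
--                     b1 += dec
--                 i += 2
--             else:
--                 if state == 1:
--                     b0 += c
--                 else:
--                     b1 += c
--                 i += 1
--         else:
--             tail_chars.append(c)
--             i += 1
--     if state == 0:
--         return None, "Expected '\"' to start first string"
--     if state == 1:
--         return None, "Error parsing first string: Unterminated string (missing closing '\"')"
--     if state == 2:
--         return None, "Expected '\"' to start second string"
--     if state == 3:
--         return None, "Error parsing second string: Unterminated string (missing closing '\"')"
--     tail = ''.join(tail_chars).strip()
--     if tail:
--         return None, f"Unexpected content after second string: {tail[:40]}"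
--     return (b0, b1), None
-- ===== Notes on version B (the rewrite author's own statement) =====
-- stated objective: alternative
-- what changed: Replaced the helper-returning-position design (a quoted-string parser raising ValueError, called twice with whitespace-skipping glue) by a single flat five-state scan of the string that tracks a state and two buffers and reports errors from the final state.
import Mathlib
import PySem

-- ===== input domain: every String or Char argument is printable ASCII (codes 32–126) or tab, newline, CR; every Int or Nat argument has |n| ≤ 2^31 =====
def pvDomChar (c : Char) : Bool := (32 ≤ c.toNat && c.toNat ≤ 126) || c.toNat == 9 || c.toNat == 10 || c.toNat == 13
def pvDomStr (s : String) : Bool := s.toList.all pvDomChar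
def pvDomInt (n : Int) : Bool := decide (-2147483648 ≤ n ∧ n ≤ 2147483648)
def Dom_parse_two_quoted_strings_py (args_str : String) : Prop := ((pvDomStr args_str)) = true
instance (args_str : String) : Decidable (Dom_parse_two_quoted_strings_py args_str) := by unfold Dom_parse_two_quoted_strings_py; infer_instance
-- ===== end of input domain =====

-- B replaces A's helper-returning-position design (a quoted-string parser raising ValueError,
-- called twice with whitespace-skipping glue) by a single flat five-state scan of the string
-- (alternative decomposition, same cost); return values are identical.
-- Both ports scan forward only, so each Python index loop is transliterated as recursion on the
-- remaining suffix of the character list (rest ≡ s[pos:]; s[pos] is rest's head, s[pos+1] the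
-- head of its tail), with the index pos carried as data where Python uses it; loops that can
-- consume two characters per step carry a fuel counter (≥ the suffix length at every call) only
-- to make the recursion structural — it never changes any result.

-- ===== PORT A =====

-- the two 'while pos < len(s) and s[pos] == " "' loops of _parse_two_quoted_strings
def pvSkipSpaces : List Char → Nat → List Char × Nat
  | c :: rest, pos => if c = ' ' then pvSkipSpaces rest (pos + 1) else (c :: rest, pos)
  | [], pos => ([], pos)

-- the while-loop of _parse_quoted_string; chars is the accumulator (''.join done by the caller);
-- ok carries (chars, rest-after-closing-quote, next pos); the inner match on rest is 'pos + 1 < len(s)'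
def pvPQLoop : Nat → List Char → Nat → List Char → Except String (List Char × List Char × Nat)
  | fuel + 1, ch :: rest, pos, chars =>
    (match rest with
     | nxt :: rest2 =>
       if ch = '\\' then
         if nxt = '"' then pvPQLoop fuel rest2 (pos + 2) (chars ++ ['"'])
         else if nxt = '\\' then pvPQLoop fuel rest2 (pos + 2) (chars ++ ['\\'])
         else if nxt = 'n' then pvPQLoop fuel rest2 (pos + 2) (chars ++ ['\n'])
         else if nxt = 't' then pvPQLoop fuel rest2 (pos + 2) (chars ++ ['\t'])
         else pvPQLoop fuel rest (pos + 1) (chars ++ [ch])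
       else if ch = '"' then .ok (chars, rest, pos + 1)
       else pvPQLoop fuel rest (pos + 1) (chars ++ [ch])
     | [] =>
       if ch = '"' then .ok (chars, rest, pos + 1)
       else pvPQLoop fuel rest (pos + 1) (chars ++ [ch]))
  | _, [], _, _ => .error "Unterminated string (missing closing '\"')"
  | 0, _ :: _, _, _ => .error "Unterminated string (missing closing '\"')"  -- fuel guard, unreachable

-- _parse_quoted_string (entry check + loop); rest = s[pos:]
def pvParseQuoted (rest : List Char) (pos : Nat) : Except String (List Char × List Char × Nat) :=
  match rest with
  | c :: r =>
    if c ≠ '"' then .error ("Expected '\"' at position " ++ PySem.Int.toStr pos)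
    else pvPQLoop r.length r (pos + 1) []
  | [] => .error ("Expected '\"' at position " ++ PySem.Int.toStr pos)

def parse_two_quoted_strings_py (args_str : String) : (Option (String × String)) × Option String :=
  if args_str = "" then (none, some "Missing arguments")
  else
    let s := args_str.toList
    let (rest1, pos1) := pvSkipSpaces s 0
    match rest1 with
    | c :: _ =>
      if c ≠ '"' then (none, some "Expected '\"' to start first string")
      else
        match pvParseQuoted rest1 pos1 with
        | .error e => (none, some ("Error parsing first string: " ++ e))
        | .ok (oldc, rest2, pos2) =>
          let (rest3, pos3) := pvSkipSpaces rest2 pos2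
          match rest3 with
          | c2 :: _ =>
            if c2 ≠ '"' then (none, some "Expected '\"' to start second string")
            else
              match pvParseQuoted rest3 pos3 with
              | .error e => (none, some ("Error parsing second string: " ++ e))
              | .ok (newc, rest4, _) =>
                let tail := PySem.Chars.strip rest4   -- s[pos:].strip(), rest4 = s[pos:]
                if tail ≠ [] then
                  (none, some ("Unexpected content after second string: " ++ String.ofList (tail.take 40)))
                else (some (String.ofList oldc, String.ofList newc), none)
          | [] => (none, some "Expected '\"' to start second string")
    | [] => (none, some "Expected '\"' to start first string")

-- ===== PORT B =====

-- the if/elif chain computing 'dec' in Source B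
def pvDecodeEsc (nxt : Char) : Char :=
  if nxt = 'n' then '\n' else if nxt = 't' then '\t' else nxt

-- the single while-loop of Source B; returns the loop's final (state, b0, b1, tail_chars);
-- the inner match on rest is 'i + 1 < n'
def pvBLoop : Nat → List Char → Nat → List Char → List Char → List Char →
    Nat × List Char × List Char × List Char
  | fuel + 1, c :: rest, state, b0, b1, tl =>
    if state = 0 ∨ state = 2 then
      if c = ' ' then pvBLoop fuel rest state b0 b1 tl
      else if c = '"' then pvBLoop fuel rest (state + 1) b0 b1 tl
      else (state, b0, b1, tl)  -- break
    else if state = 1 ∨ state = 3 then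
      if c = '"' then pvBLoop fuel rest (state + 1) b0 b1 tl
      else
        match rest with
        | nxt :: rest2 =>
          if c = '\\' ∧ (nxt = '"' ∨ nxt = '\\' ∨ nxt = 'n' ∨ nxt = 't') then
            if state = 1 then pvBLoop fuel rest2 state (b0 ++ [pvDecodeEsc nxt]) b1 tl
            else pvBLoop fuel rest2 state b0 (b1 ++ [pvDecodeEsc nxt]) tl
          else if state = 1 then pvBLoop fuel rest state (b0 ++ [c]) b1 tl
          else pvBLoop fuel rest state b0 (b1 ++ [c]) tl
        | [] =>
          if state = 1 then pvBLoop fuel rest state (b0 ++ [c]) b1 tl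
          else pvBLoop fuel rest state b0 (b1 ++ [c]) tl
    else pvBLoop fuel rest state b0 b1 (tl ++ [c])
  | _, [], state, b0, b1, tl => (state, b0, b1, tl)
  | 0, _ :: _, state, b0, b1, tl => (state, b0, b1, tl)  -- fuel guard, unreachable

-- Source B's code after the loop
def pvBFinish (r : Nat × List Char × List Char × List Char) :
    (Option (String × String)) × Option String :=
  let (state, b0, b1, tl) := r
  if state = 0 then (none, some "Expected '\"' to start first string")
  else if state = 1 then
    (none, some "Error parsing first string: Unterminated string (missing closing '\"')")
  else if state = 2 then (none, some "Expected '\"' to start second string")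
  else if state = 3 then
    (none, some "Error parsing second string: Unterminated string (missing closing '\"')")
  else
    let tail := PySem.Chars.strip tl
    if tail ≠ [] then
      (none, some ("Unexpected content after second string: " ++ String.ofList (tail.take 40)))
    else (some (String.ofList b0, String.ofList b1), none)

def parse_two_quoted_strings_py_alt (args_str : String) : (Option (String × String)) × Option String :=
  if args_str = "" then (none, some "Missing arguments")
  else pvBFinish (pvBLoop args_str.toList.length args_str.toList 0 [] [] [])

-- ===== PRECONDITION & SPEC =====
def Spec_parse_two_quoted_strings_py (args_str : String) (out : (Option (String × String)) × Option String) : Prop := out = parse_two_quoted_strings_py_alt args_str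
instance (args_str : String) (out : (Option (String × String)) × Option String) : Decidable (Spec_parse_two_quoted_strings_py args_str out) := by unfold Spec_parse_two_quoted_strings_py; infer_instance

-- ===== CLAIM (what is proved, stated in full; the proofs are below) =====
def Claim_equal_parse_two_quoted_strings_py : Prop := ∀ (args_str : String), Dom_parse_two_quoted_strings_py args_str → Spec_parse_two_quoted_strings_py args_str (parse_two_quoted_strings_py args_str)

-- ===== LEMMAS AND PROOFS =====

-- the fuel never changes the result while it bounds the suffix length
theorem pvBLoop_congr :
    ∀ f g rest st b0 b1 tl, List.length rest ≤ f → List.length rest ≤ g →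
    pvBLoop f rest st b0 b1 tl = pvBLoop g rest st b0 b1 tl := by
  intro f
  induction f with
  | zero =>
    intro g rest st b0 b1 tl hf hg
    have : rest = [] := List.eq_nil_of_length_eq_zero (by omega)
    subst this
    cases g <;> rfl
  | succ f ih =>
    intro g rest st b0 b1 tl hf hg
    cases rest with
    | nil => cases g <;> rfl
    | cons c rest =>
      cases g with
      | zero => simp at hg
      | succ g =>
        cases rest with
        | nil => simp only [pvBLoop]
        | cons nxt rest2 =>
          simp only [pvBLoop]
          split_ifs
          all_goals try rfl
          all_goals apply ih <;> ((try simp only [List.length_cons, List.length_nil] at hf hg ⊢) <;> omega)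

-- seek states (0 and 2): B's loop skips spaces exactly like A's skip loops, then either
-- consumes the opening quote (state + 1) or stops
theorem pvBLoop_seek (st : Nat) (hst : st = 0 ∨ st = 2) :
    ∀ f rest pos b0 b1 tl, List.length rest ≤ f →
    pvBLoop f rest st b0 b1 tl =
      (match (pvSkipSpaces rest pos).1 with
      | c :: r' => if c = '"' then pvBLoop r'.length r' (st + 1) b0 b1 tl else (st, b0, b1, tl)
      | [] => (st, b0, b1, tl)) := by
  intro f
  induction f with
  | zero =>
    intro rest pos b0 b1 tl hf
    have : rest = [] := List.eq_nil_of_length_eq_zero (by omega)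
    subst this
    rfl
  | succ f ih =>
    intro rest pos b0 b1 tl hf
    cases rest with
    | nil => rfl
    | cons c rest =>
      by_cases hsp : c = ' '
      · have hq : c ≠ '"' := by rw [hsp]; decide
        simp only [pvBLoop, pvSkipSpaces, hsp, if_true]
        rw [if_pos hst]
        exact ih rest (pos + 1) b0 b1 tl (by simp at hf; omega)
      · simp only [pvBLoop, pvSkipSpaces, hsp, if_false, ite_false]
        split_ifs with hq
        · exact pvBLoop_congr f rest.length rest (st + 1) b0 b1 tl (by simp at hf; omega) le_rfl
        · rfl

-- string state 1: B's loop decodes the first quoted body exactly like A's _parse_quoted_string loop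
theorem pvBLoop_str1 :
    ∀ n f g rest pos cs b1 tl, List.length rest ≤ n → List.length rest ≤ f → List.length rest ≤ g →
    pvBFinish (pvBLoop f rest 1 cs b1 tl) =
      (match pvPQLoop g rest pos cs with
      | .error e => (none, some ("Error parsing first string: " ++ e))
      | .ok (cs', rest', _) => pvBFinish (pvBLoop rest'.length rest' 2 cs' b1 tl)) := by
  intro n
  induction n with
  | zero =>
    intro f g rest pos cs B T hn hf hg
    have : rest = [] := List.eq_nil_of_length_eq_zero (by omega)
    subst this
    cases f <;> cases g <;> simp [pvBLoop, pvPQLoop, pvBFinish] <;> rfl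
  | succ n ih =>
    intro f g rest pos cs B T hn hf hg
    cases rest with
    | nil => cases f <;> cases g <;> simp [pvBLoop, pvPQLoop, pvBFinish] <;> rfl
    | cons ch rest =>
      cases f with
      | zero => simp at hf
      | succ f =>
        cases g with
        | zero => simp at hg
        | succ g =>
          cases rest with
          | nil =>
            by_cases hq : ch = '"'
            · simp [pvBLoop, pvPQLoop, hq]
            · simp [pvBLoop, pvPQLoop, pvBFinish, hq] <;> rfl
          | cons nxt rest2 =>
            by_cases hq : ch = '"'
            · have hbs : ch ≠ '\\' := by rw [hq]; decide
              simp only [pvBLoop, pvPQLoop]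
              simp [hq, hbs]
              exact congrArg pvBFinish
                (pvBLoop_congr f (nxt :: rest2).length (nxt :: rest2) 2 cs B T
                  (by simp at hf ⊢; omega) le_rfl)
            · by_cases hbs : ch = '\\'
              · by_cases e1 : nxt = '"'
                · simp only [pvBLoop, pvPQLoop]
                  simp [hq, hbs, e1, pvDecodeEsc]
                  exact ih f g rest2 (pos + 2) (cs ++ ['"']) B T (by simp at hn ⊢; omega)
                    (by simp at hf ⊢; omega) (by simp at hg ⊢; omega)
                · by_cases e2 : nxt = '\\'
                  · simp only [pvBLoop, pvPQLoop]
                    simp [hq, hbs, e1, e2, pvDecodeEsc]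
                    exact ih f g rest2 (pos + 2) (cs ++ ['\\']) B T (by simp at hn ⊢; omega)
                      (by simp at hf ⊢; omega) (by simp at hg ⊢; omega)
                  · by_cases e3 : nxt = 'n'
                    · simp only [pvBLoop, pvPQLoop]
                      simp [hq, hbs, e1, e2, e3, pvDecodeEsc]
                      exact ih f g rest2 (pos + 2) (cs ++ ['\n']) B T (by simp at hn ⊢; omega)
                        (by simp at hf ⊢; omega) (by simp at hg ⊢; omega)
                    · by_cases e4 : nxt = 't'
                      · simp only [pvBLoop, pvPQLoop]
                        simp [hq, hbs, e1, e2, e3, e4, pvDecodeEsc]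
                        exact ih f g rest2 (pos + 2) (cs ++ ['\t']) B T (by simp at hn ⊢; omega)
                          (by simp at hf ⊢; omega) (by simp at hg ⊢; omega)
                      · simp only [pvBLoop, pvPQLoop]
                        simp [hq, hbs, e1, e2, e3, e4]
                        exact ih f g (nxt :: rest2) (pos + 1) (cs ++ ['\\']) B T (by simp at hn ⊢; omega)
                          (by simp at hf ⊢; omega) (by simp at hg ⊢; omega)
              · simp only [pvBLoop, pvPQLoop]
                simp [hq, hbs]
                exact ih f g (nxt :: rest2) (pos + 1) (cs ++ [ch]) B T (by simp at hn ⊢; omega)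
                  (by simp at hf ⊢; omega) (by simp at hg ⊢; omega)

-- string state 3: same for the second quoted body
theorem pvBLoop_str3 :
    ∀ n f g rest pos cs b0 tl, List.length rest ≤ n → List.length rest ≤ f → List.length rest ≤ g →
    pvBFinish (pvBLoop f rest 3 b0 cs tl) =
      (match pvPQLoop g rest pos cs with
      | .error e => (none, some ("Error parsing second string: " ++ e))
      | .ok (cs', rest', _) => pvBFinish (pvBLoop rest'.length rest' 4 b0 cs' tl)) := by
  intro n
  induction n with
  | zero =>
    intro f g rest pos cs B T hn hf hg
    have : rest = [] := List.eq_nil_of_length_eq_zero (by omega)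
    subst this
    cases f <;> cases g <;> simp [pvBLoop, pvPQLoop, pvBFinish] <;> rfl
  | succ n ih =>
    intro f g rest pos cs B T hn hf hg
    cases rest with
    | nil => cases f <;> cases g <;> simp [pvBLoop, pvPQLoop, pvBFinish] <;> rfl
    | cons ch rest =>
      cases f with
      | zero => simp at hf
      | succ f =>
        cases g with
        | zero => simp at hg
        | succ g =>
          cases rest with
          | nil =>
            by_cases hq : ch = '"'
            · simp [pvBLoop, pvPQLoop, hq]
            · simp [pvBLoop, pvPQLoop, pvBFinish, hq] <;> rfl
          | cons nxt rest2 =>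
            by_cases hq : ch = '"'
            · have hbs : ch ≠ '\\' := by rw [hq]; decide
              simp only [pvBLoop, pvPQLoop]
              simp [hq, hbs]
              exact congrArg pvBFinish
                (pvBLoop_congr f (nxt :: rest2).length (nxt :: rest2) 4 B cs T
                  (by simp at hf ⊢; omega) le_rfl)
            · by_cases hbs : ch = '\\'
              · by_cases e1 : nxt = '"'
                · simp only [pvBLoop, pvPQLoop]
                  simp [hq, hbs, e1, pvDecodeEsc]
                  exact ih f g rest2 (pos + 2) (cs ++ ['"']) B T (by simp at hn ⊢; omega)
                    (by simp at hf ⊢; omega) (by simp at hg ⊢; omega)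
                · by_cases e2 : nxt = '\\'
                  · simp only [pvBLoop, pvPQLoop]
                    simp [hq, hbs, e1, e2, pvDecodeEsc]
                    exact ih f g rest2 (pos + 2) (cs ++ ['\\']) B T (by simp at hn ⊢; omega)
                      (by simp at hf ⊢; omega) (by simp at hg ⊢; omega)
                  · by_cases e3 : nxt = 'n'
                    · simp only [pvBLoop, pvPQLoop]
                      simp [hq, hbs, e1, e2, e3, pvDecodeEsc]
                      exact ih f g rest2 (pos + 2) (cs ++ ['\n']) B T (by simp at hn ⊢; omega)
                        (by simp at hf ⊢; omega) (by simp at hg ⊢; omega)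
                    · by_cases e4 : nxt = 't'
                      · simp only [pvBLoop, pvPQLoop]
                        simp [hq, hbs, e1, e2, e3, e4, pvDecodeEsc]
                        exact ih f g rest2 (pos + 2) (cs ++ ['\t']) B T (by simp at hn ⊢; omega)
                          (by simp at hf ⊢; omega) (by simp at hg ⊢; omega)
                      · simp only [pvBLoop, pvPQLoop]
                        simp [hq, hbs, e1, e2, e3, e4]
                        exact ih f g (nxt :: rest2) (pos + 1) (cs ++ ['\\']) B T (by simp at hn ⊢; omega)
                          (by simp at hf ⊢; omega) (by simp at hg ⊢; omega)
              · simp only [pvBLoop, pvPQLoop]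
                simp [hq, hbs]
                exact ih f g (nxt :: rest2) (pos + 1) (cs ++ [ch]) B T (by simp at hn ⊢; omega)
                  (by simp at hf ⊢; omega) (by simp at hg ⊢; omega)

-- tail state (4): collects the rest of the string
theorem pvBLoop_tail :
    ∀ f rest b0 b1 tl, List.length rest ≤ f →
    pvBLoop f rest 4 b0 b1 tl = (4, b0, b1, tl ++ rest) := by
  intro f
  induction f with
  | zero =>
    intro rest b0 b1 tl hf
    have : rest = [] := List.eq_nil_of_length_eq_zero (by omega)
    subst this
    simp [pvBLoop]
  | succ f ih =>
    intro rest b0 b1 tl hf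
    cases rest with
    | nil => simp [pvBLoop]
    | cons c rest =>
      simp only [pvBLoop]
      norm_num
      rw [ih rest b0 b1 (tl ++ [c]) (by simp at hf; omega)]
      simp

-- ===== VERDICT (by name: the statement is the Claim_ definition above) =====
theorem parse_two_quoted_strings_py_spec : Claim_equal_parse_two_quoted_strings_py := by
  intro args_str _
  show parse_two_quoted_strings_py args_str = parse_two_quoted_strings_py_alt args_str
  unfold parse_two_quoted_strings_py parse_two_quoted_strings_py_alt
  by_cases he : args_str = ""
  · simp [he]
  · simp only [he, if_false]
    rw [pvBLoop_seek 0 (Or.inl rfl) args_str.toList.length args_str.toList 0 [] [] [] le_rfl]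
    cases hsp : pvSkipSpaces args_str.toList 0 with
    | mk rest1 pos1 =>
      cases rest1 with
      | nil => rfl
      | cons c r =>
        by_cases hq : c = '"'
        · simp only [hq, ne_eq, not_true_eq_false, if_false, ite_true, if_true, pvParseQuoted]
          rw [pvBLoop_str1 r.length r.length r.length r (pos1 + 1) [] [] [] le_rfl le_rfl le_rfl]
          cases hpq : pvPQLoop r.length r (pos1 + 1) [] with
          | error e => simp
          | ok v =>
            obtain ⟨cs, rest2, pos2⟩ := v
            simp only
            rw [pvBLoop_seek 2 (Or.inr rfl) rest2.length rest2 pos2 cs [] [] le_rfl]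
            cases hsp2 : pvSkipSpaces rest2 pos2 with
            | mk rest3 pos3 =>
              cases rest3 with
              | nil => rfl
              | cons c2 r2 =>
                by_cases hq2 : c2 = '"'
                · simp only [hq2, ne_eq, not_true_eq_false, if_false, ite_true, if_true,
                    pvParseQuoted]
                  rw [pvBLoop_str3 r2.length r2.length r2.length r2 (pos3 + 1) [] cs []
                    le_rfl le_rfl le_rfl]
                  cases hpq2 : pvPQLoop r2.length r2 (pos3 + 1) [] with
                  | error e => simp
                  | ok v2 =>
                    obtain ⟨cs2, rest4, pos4⟩ := v2
                    simp only
                    rw [pvBLoop_tail rest4.length rest4 cs cs2 [] le_rfl]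
                    simp [pvBFinish]
                · simp [hq2, pvBFinish]
        · simp [hq, pvBFinish]
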